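-- pv_equiv track=rewrite | github.com/joshmaglione/MagmaDocumentation | buildMagmaDoc.py | replace_known_defs
-- ===== SOURCE A (Python) =====
-- def replace_known_defs(line):
--     known_defs = {
--         "\\mathbb{Z}" : "\\Z",
--         "{\\mathbb Z}" : "\\Z",
--         "\\mathbb{Q}" : "\\Q",
--         "{\\mathbb Q}" : "\\Q",
--         "\\mathrm{GL}" : "\\GL",
--         "{\\mathrm GL}" : "\\GL",
--         "\\mathrm{SL}" : "\\SL",
--         "{\\mathrm SL}" : "\\SL",
--         "\\mathrm{GF}" : "\\GF",
--         "{\\mathrm GF}" : "\\GF",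
--         "\\mathrm{PSL}" : "\\PSL",
--         "{\\mathrm PSL}" : "\\PSL",
--         "\\mathrm{Sym}" : "\\Sym",
--         "{\\mathrm Sym}" : "\\Sym",
--         "\\mathrm{Alt}" : "\\Alt",
--         "{\\mathrm Alt}" : "\\Alt"
--     }
--     for key in known_defs.keys():
--         if key in line:
--             line = line.replace(key, known_defs[key])
--     return line
-- ===== SOURCE B (Python) =====
-- _PAIRS = [
--     ("\\mathbb{Z}", "\\Z"),
--     ("{\\mathbb Z}", "\\Z"),
--     ("\\mathbb{Q}", "\\Q"),
--     ("{\\mathbb Q}", "\\Q"),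
--     ("\\mathrm{GL}", "\\GL"),
--     ("{\\mathrm GL}", "\\GL"),
--     ("\\mathrm{SL}", "\\SL"),
--     ("{\\mathrm SL}", "\\SL"),
--     ("\\mathrm{GF}", "\\GF"),
--     ("{\\mathrm GF}", "\\GF"),
--     ("\\mathrm{PSL}", "\\PSL"),
--     ("{\\mathrm PSL}", "\\PSL"),
--     ("\\mathrm{Sym}", "\\Sym"),
--     ("{\\mathrm Sym}", "\\Sym"),
--     ("\\mathrm{Alt}", "\\Alt"),
--     ("{\\mathrm Alt}", "\\Alt"),
-- ]
--
-- def replace_known_defs(line):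
--     # single left-to-right pass: at each position emit the first matching
--     # macro's replacement (skipping the key) or the character itself
--     out = []
--     i = 0
--     n = len(line)
--     while i < n:
--         for k, v in _PAIRS:
--             if line.startswith(k, i):
--                 out.append(v)
--                 i += len(k)
--                 break
--         else:
--             out.append(line[i])
--             i += 1
--     return "".join(out)
-- ===== Notes on version B (the rewrite author's own statement) =====
-- stated objective: alternative
-- what changed: Replaces A's sixteen sequential full-string replace passes (one scan-and-copy per macro key) by a single left-to-right scan of the line that at each position tries the ordered key table once, emitting the replacement or the character; correct because the keys never overlap and no replacement text can create a new key match.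
import Mathlib
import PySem

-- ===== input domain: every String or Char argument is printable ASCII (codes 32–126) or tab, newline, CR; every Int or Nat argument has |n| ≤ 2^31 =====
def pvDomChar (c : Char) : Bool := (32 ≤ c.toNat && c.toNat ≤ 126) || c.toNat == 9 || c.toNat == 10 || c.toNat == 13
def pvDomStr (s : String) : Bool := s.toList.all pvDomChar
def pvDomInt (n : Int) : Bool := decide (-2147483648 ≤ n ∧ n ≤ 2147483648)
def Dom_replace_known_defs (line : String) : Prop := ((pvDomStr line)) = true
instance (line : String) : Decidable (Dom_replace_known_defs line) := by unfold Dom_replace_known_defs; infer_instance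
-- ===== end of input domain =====

-- B changes the strategy, not the result: one left-to-right scan of the line consulting the
-- ordered macro table at each position, instead of A's sixteen sequential full-string replaces.

-- ===== PORT A =====
-- the dict (insertion order) as an association list
def knownDefs : List (String × String) := [
  ("\\mathbb{Z}", "\\Z"),
  ("{\\mathbb Z}", "\\Z"),
  ("\\mathbb{Q}", "\\Q"),
  ("{\\mathbb Q}", "\\Q"),
  ("\\mathrm{GL}", "\\GL"),
  ("{\\mathrm GL}", "\\GL"),
  ("\\mathrm{SL}", "\\SL"),
  ("{\\mathrm SL}", "\\SL"),
  ("\\mathrm{GF}", "\\GF"),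
  ("{\\mathrm GF}", "\\GF"),
  ("\\mathrm{PSL}", "\\PSL"),
  ("{\\mathrm PSL}", "\\PSL"),
  ("\\mathrm{Sym}", "\\Sym"),
  ("{\\mathrm Sym}", "\\Sym"),
  ("\\mathrm{Alt}", "\\Alt"),
  ("{\\mathrm Alt}", "\\Alt")]

def replace_known_defs (line : String) : String :=
  knownDefs.foldl
    (fun line kv => if PySem.Str.isIn kv.1 line then PySem.Str.replace line kv.1 kv.2 else line)
    line

-- ===== PORT B =====
-- B's table (Source B's _PAIRS), as code-point lists
def bDefs : List (String × String) := [
  ("\\mathbb{Z}", "\\Z"),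
  ("{\\mathbb Z}", "\\Z"),
  ("\\mathbb{Q}", "\\Q"),
  ("{\\mathbb Q}", "\\Q"),
  ("\\mathrm{GL}", "\\GL"),
  ("{\\mathrm GL}", "\\GL"),
  ("\\mathrm{SL}", "\\SL"),
  ("{\\mathrm SL}", "\\SL"),
  ("\\mathrm{GF}", "\\GF"),
  ("{\\mathrm GF}", "\\GF"),
  ("\\mathrm{PSL}", "\\PSL"),
  ("{\\mathrm PSL}", "\\PSL"),
  ("\\mathrm{Sym}", "\\Sym"),
  ("{\\mathrm Sym}", "\\Sym"),
  ("\\mathrm{Alt}", "\\Alt"),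
  ("{\\mathrm Alt}", "\\Alt")]

def bPairs : List (List Char × List Char) :=
  bDefs.map (fun kv => (kv.1.toList, kv.2.toList))

-- the single left-to-right scan of Source B's while-loop
def scanB : List Char → List Char
  | [] => []
  | c :: t =>
    match bPairs.find? (fun p => p.1.isPrefixOf (c :: t)) with
    | some p => p.2 ++ scanB (t.drop (p.1.length - 1))
    | none => c :: scanB t
termination_by l => l.length
decreasing_by
  · have := List.length_drop (l := t) (i := p.1.length - 1)
    simp only [List.length_cons]; omega
  · simp

def replace_known_defs_alt (line : String) : String := String.ofList (scanB line.toList)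

-- ===== PRECONDITION & SPEC =====
def Spec_replace_known_defs (line : String) (out : String) : Prop := out = replace_known_defs_alt line
instance (line : String) (out : String) : Decidable (Spec_replace_known_defs line out) := by unfold Spec_replace_known_defs; infer_instance

-- ===== CLAIM (what is proved, stated in full; the proofs are below) =====
def Claim_equal_replace_known_defs : Prop := ∀ (line : String), Dom_replace_known_defs line → Spec_replace_known_defs line (replace_known_defs line)

-- ===== LEMMAS AND PROOFS =====

-- fuel-free form of PySem.Chars.replace for a nonempty pattern
def repAll (old new : List Char) : List Char → List Char
  | [] => []
  | c :: t =>
    if old.isPrefixOf (c :: t) then new ++ repAll old new (t.drop (old.length - 1))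
    else c :: repAll old new t
termination_by l => l.length
decreasing_by
  · have := List.length_drop (l := t) (i := old.length - 1)
    simp only [List.length_cons]; omega
  · simp

lemma go_eq_repAll (old new : List Char) (h : old ≠ []) :
    ∀ fuel l acc, l.length ≤ fuel →
      PySem.Chars.replace.go old new fuel l acc = acc.reverse ++ repAll old new l := by
  intro fuel
  induction fuel with
  | zero =>
    intro l acc hl
    have : l = [] := by cases l <;> simp_all
    subst this
    simp [PySem.Chars.replace.go, repAll]
  | succ n ih =>
    intro l acc hl
    cases l with
    | nil => simp [PySem.Chars.replace.go, repAll]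
    | cons c t =>
      rw [PySem.Chars.replace.go]
      by_cases hp : old.isPrefixOf (c :: t)
      · rw [if_pos hp]
        obtain ⟨a, old', rfl⟩ : ∃ a old', old = a :: old' := by
          cases old with
          | nil => exact absurd rfl h
          | cons a old' => exact ⟨a, old', rfl⟩
        have hdrop : List.drop (a :: old').length (c :: t) = t.drop ((a :: old').length - 1) := by
          simp
        rw [hdrop, ih _ _ (by simp only [List.length_drop]; simp only [List.length_cons] at hl; omega)]
        rw [repAll, if_pos hp]
        simp
      · rw [if_neg hp, ih _ _ (by simp only [List.length_cons] at hl; omega)]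
        rw [repAll, if_neg hp]
        simp

lemma replace_eq_repAll (old new s : List Char) (h : old ≠ []) :
    PySem.Chars.replace s old new = repAll old new s := by
  rw [PySem.Chars.replace, if_neg (by simpa [List.isEmpty_iff] using h)]
  simpa using go_eq_repAll old new h s.length s [] le_rfl

-- "the pattern k matches nowhere inside u, nor at a position straddling u's end"
def clashFree (u k : List Char) : Bool :=
  (List.range u.length).all (fun d => !((u.drop d).isPrefixOf k) && !(k.isPrefixOf (u.drop d)))

lemma clashFree_iff {u k : List Char} :
    clashFree u k = true ↔ ∀ d, d < u.length → ¬ ((u.drop d) <+: k) ∧ ¬ (k <+: u.drop d) := by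
  simp only [clashFree, List.all_eq_true, List.mem_range, Bool.and_eq_true, Bool.not_eq_true',
    Bool.eq_false_iff, ne_eq, List.isPrefixOf_iff_prefix]

-- every '\' in w is immediately followed by 'm' (true of every key suffix)
def qOK : List Char → Bool
  | [] => true
  | a :: rest => (a != '\\' || rest.head? == some 'm') && qOK rest

-- a replacement value: starts '\' then a non-'m' character
def vGood (v : List Char) : Bool :=
  v.head? == some '\\' && !(v.tail.head? == some 'm') && !v.tail.isEmpty

lemma prefix_append_cases {k u t : List Char} (h : k <+: u ++ t) : k <+: u ∨ u <+: k := by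
  rcases Nat.le_total k.length u.length with hl | hl
  · exact Or.inl (List.prefix_of_prefix_length_le h (List.prefix_append u t) hl)
  · exact Or.inr (List.prefix_of_prefix_length_le (List.prefix_append u t) h hl)

lemma repAll_shift {u k : List Char} (v t : List Char) (_hk : k ≠ []) (h : clashFree u k = true) :
    repAll k v (u ++ t) = u ++ repAll k v t := by
  induction u with
  | nil => rfl
  | cons c u' ih =>
    have h' := clashFree_iff.mp h
    have h0 := h' 0 (by simp)
    simp only [List.drop_zero] at h0
    rw [List.cons_append, repAll, if_neg]
    · rw [ih (clashFree_iff.mpr (fun d hd => by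
        have := h' (d + 1) (by simpa using Nat.succ_lt_succ hd)
        simpa using this))]
      simp
    · intro hp
      rw [List.isPrefixOf_iff_prefix, ← List.cons_append] at hp
      rcases prefix_append_cases hp with h1 | h1
      · exact h0.2 h1
      · exact h0.1 h1

lemma repAll_self (k v t : List Char) (hk : k ≠ []) :
    repAll k v (k ++ t) = v ++ repAll k v t := by
  obtain ⟨a, k', rfl⟩ : ∃ a k', k = a :: k' := by
    cases k with
    | nil => exact absurd rfl hk
    | cons a k' => exact ⟨a, k', rfl⟩
  rw [List.cons_append, repAll, if_pos]
  · simp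
  · rw [List.isPrefixOf_iff_prefix, ← List.cons_append]
    exact List.prefix_append _ _

lemma repAll_nil (k v : List Char) : repAll k v [] = [] := by
  rw [repAll]

lemma repAll_of_not_infix {k : List Char} (v : List Char) {x : List Char} (h : ¬ k <:+: x) :
    repAll k v x = x := by
  induction x with
  | nil => rw [repAll]
  | cons c t ih =>
    rw [repAll, if_neg]
    · rw [ih (fun hi => h (List.infix_cons hi))]
    · intro hp
      rw [List.isPrefixOf_iff_prefix] at hp
      exact h hp.isInfix

-- no replacement can create a new match: a qOK pattern matching the output matched the input
lemma no_create {k v : List Char} (_hk : k ≠ []) (hv : vGood v = true) :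
    ∀ n x w, x.length ≤ n → qOK w = true → w <+: repAll k v x → w <+: x := by
  obtain ⟨d, v', hveq, hdm⟩ : ∃ d v', v = '\\' :: d :: v' ∧ d ≠ 'm' := by
    simp only [vGood, Bool.and_eq_true, beq_iff_eq, Bool.not_eq_true', beq_eq_false_iff_ne, ne_eq,
      List.isEmpty_eq_false_iff] at hv
    obtain ⟨⟨hh, hm⟩, ht⟩ := hv
    cases v with
    | nil => simp at hh
    | cons b v₁ =>
      cases v₁ with
      | nil => simp at ht
      | cons d v' =>
        simp only [List.head?_cons, Option.some.injEq] at hh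
        simp only [List.tail_cons, List.head?_cons, Option.some.injEq] at hm
        exact ⟨d, v', by rw [hh], hm⟩
  subst hveq
  intro n
  induction n with
  | zero =>
    intro x w hx _ hp
    have : x = [] := by cases x <;> simp_all
    subst this
    rw [repAll_nil] at hp
    simp [List.prefix_nil.mp hp]
  | succ n ih =>
    intro x w hx hq hp
    cases x with
    | nil =>
      rw [repAll_nil] at hp
      simp [List.prefix_nil.mp hp]
    | cons c t =>
      rw [repAll] at hp
      by_cases hk' : k.isPrefixOf (c :: t)
      · rw [if_pos hk'] at hp
        cases w with
        | nil => exact List.nil_prefix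
        | cons a w₂ =>
          exfalso
          rw [List.cons_append, List.cons_append] at hp
          obtain ⟨ha, hp₂⟩ := List.cons_prefix_cons.mp hp
          simp only [qOK, Bool.and_eq_true, Bool.or_eq_true, bne_iff_ne, ne_eq, beq_iff_eq] at hq
          rcases hq.1 with h1 | h1
          · exact h1 ha
          · cases w₂ with
            | nil => simp at h1
            | cons e w₃ =>
              simp only [List.head?_cons, Option.some.injEq] at h1
              obtain ⟨he, _⟩ := List.cons_prefix_cons.mp hp₂
              exact hdm (by rw [← he, h1])
      · rw [if_neg hk'] at hp
        cases w with
        | nil => exact List.nil_prefix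
        | cons a w₂ =>
          obtain ⟨ha, hp₂⟩ := List.cons_prefix_cons.mp hp
          have hq₂ : qOK w₂ = true := by
            simp only [qOK, Bool.and_eq_true] at hq
            exact hq.2
          have := ih t w₂ (by simpa using Nat.le_of_succ_le_succ hx) hq₂ hp₂
          exact List.cons_prefix_cons.mpr ⟨ha, this⟩

def stepR (l : List Char) (p : List Char × List Char) : List Char := repAll p.1 p.2 l

lemma fold_nil (ps : List (List Char × List Char)) : ps.foldl stepR [] = [] := by
  induction ps with
  | nil => rfl
  | cons q ps ih => simpa [stepR, repAll_nil] using ih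

lemma fold_shift (ps : List (List Char × List Char)) (u X : List Char)
    (h : ∀ q ∈ ps, q.1 ≠ [] ∧ clashFree u q.1 = true) :
    ps.foldl stepR (u ++ X) = u ++ ps.foldl stepR X := by
  induction ps generalizing X with
  | nil => rfl
  | cons q ps ih =>
    have hq := h q (by simp)
    simp only [List.foldl_cons, stepR]
    rw [repAll_shift q.2 X hq.1 hq.2]
    exact ih _ (fun q' hq' => h q' (by simp [hq']))

lemma fold_cons (ps : List (List Char × List Char)) (c : Char) (t : List Char)
    (h : ∀ q ∈ ps, q.1 ≠ [] ∧ vGood q.2 = true ∧ qOK q.1 = true ∧ ¬ q.1 <+: (c :: t)) :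
    ps.foldl stepR (c :: t) = c :: ps.foldl stepR t := by
  induction ps generalizing t with
  | nil => rfl
  | cons q ps ih =>
    have hq := h q (by simp)
    have hstep : repAll q.1 q.2 (c :: t) = c :: repAll q.1 q.2 t := by
      rw [repAll, if_neg (fun hp => hq.2.2.2 (List.isPrefixOf_iff_prefix.mp hp))]
    simp only [List.foldl_cons, stepR, hstep]
    refine ih (repAll q.1 q.2 t) (fun q' hq' => ?_)
    obtain ⟨h1, h2, h3, _⟩ := h q' (by simp [hq'])
    refine ⟨h1, h2, h3, fun hp => ?_⟩
    rw [← hstep] at hp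
    exact (h q' (by simp [hq'])).2.2.2
      (no_create hq.1 hq.2.1 (c :: t).length (c :: t) q'.1 le_rfl h3 hp)

-- finite facts about the concrete table
lemma tbl_clash : ∀ p ∈ bPairs, ∀ q ∈ bPairs, p.1 = q.1 ∨ clashFree q.1 p.1 = true := by decide
lemma tbl_vclash : ∀ p ∈ bPairs, ∀ q ∈ bPairs, clashFree q.2 p.1 = true := by decide
lemma tbl_good : ∀ p ∈ bPairs, p.1 ≠ [] ∧ vGood p.2 = true ∧ qOK p.1 = true := by decide

lemma foldC_eq_scanB : ∀ n l, l.length ≤ n → bPairs.foldl stepR l = scanB l := by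
  intro n
  induction n with
  | zero =>
    intro l hl
    have : l = [] := by cases l <;> simp_all
    subst this
    rw [fold_nil, scanB]
  | succ n ih =>
    intro l hl
    cases l with
    | nil => rw [fold_nil, scanB]
    | cons c t =>
      cases hf : bPairs.find? (fun p => p.1.isPrefixOf (c :: t)) with
      | none =>
        have hall := List.find?_eq_none.mp hf
        rw [scanB]
        simp only [hf]
        rw [fold_cons _ _ _ (fun q hq => by
          obtain ⟨h1, h2, h3⟩ := tbl_good q hq
          exact ⟨h1, h2, h3, fun hp =>
            hall q hq (List.isPrefixOf_iff_prefix.mpr hp)⟩)]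
        rw [ih t (by simpa using Nat.le_of_succ_le_succ hl)]
      | some p =>
        obtain ⟨pk, pv⟩ := p
        obtain ⟨hpred, pre, post, hsplit, hpre⟩ := List.find?_eq_some_iff_append.mp hf
        have hpmem : (pk, pv) ∈ bPairs := List.mem_of_find?_eq_some hf
        have hplen := (tbl_good (pk, pv) hpmem).1
        simp only at hpred hplen
        have hppre : pk <+: c :: t := List.isPrefixOf_iff_prefix.mp hpred
        obtain ⟨rest, hrest⟩ := hppre
        cases pk with
        | nil => exact absurd rfl hplen
        | cons a k' =>
          rw [List.cons_append] at hrest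
          obtain ⟨rfl, hteq⟩ : a = c ∧ k' ++ rest = t := by
            injection hrest with h1 h2
            exact ⟨h1, h2⟩
          subst hteq
          -- scanB side
          rw [scanB]
          simp only [hf, List.length_cons, Nat.add_sub_cancel, List.drop_left]
          -- fold side
          rw [hsplit, List.foldl_append, List.foldl_cons]
          have hshift1 : pre.foldl stepR (a :: (k' ++ rest)) = (a :: k') ++ pre.foldl stepR rest := by
            rw [show a :: (k' ++ rest) = (a :: k') ++ rest from rfl]
            refine fold_shift pre (a :: k') rest (fun q hq => ?_)
            have hqmem : q ∈ bPairs := by rw [hsplit]; exact List.mem_append_left _ hq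
            refine ⟨(tbl_good q hqmem).1, ?_⟩
            rcases tbl_clash q hqmem (a :: k', pv) hpmem with heq | hcf
            · exfalso
              have := hpre q hq
              simp only at heq
              rw [heq] at this
              simp [hpred] at this
            · exact hcf
          rw [hshift1]
          simp only [stepR]
          rw [repAll_self _ _ _ hplen]
          rw [fold_shift post pv _ (fun q hq => by
            have hqmem : q ∈ bPairs := by
              rw [hsplit]; exact List.mem_append_right _ (List.mem_cons_of_mem _ hq)
            exact ⟨(tbl_good q hqmem).1, tbl_vclash q hqmem (a :: k', pv) hpmem⟩)]
          have hfold : bPairs.foldl stepR rest = scanB rest := by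
            refine ih rest ?_
            simp only [List.length_cons, List.length_append] at hl
            omega
          rw [← hfold, hsplit, List.foldl_append, List.foldl_cons]
          rfl

theorem main_lists (l : List Char) : bPairs.foldl stepR l = scanB l :=
  foldC_eq_scanB l.length l le_rfl

lemma bridge : ∀ (ps : List (String × String)) (s : String), (∀ p ∈ ps, p.1.toList ≠ []) →
    (ps.foldl (fun line kv =>
        if PySem.Str.isIn kv.1 line then PySem.Str.replace line kv.1 kv.2 else line) s).toList
      = (ps.map (fun kv => (kv.1.toList, kv.2.toList))).foldl stepR s.toList := by
  intro ps
  induction ps with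
  | nil => intro s _; rfl
  | cons kv ps ih =>
    intro s h
    have hk := h kv (by simp)
    simp only [List.foldl_cons, List.map_cons]
    have hstep : (if PySem.Str.isIn kv.1 s then PySem.Str.replace s kv.1 kv.2 else s).toList
        = stepR s.toList (kv.1.toList, kv.2.toList) := by
      by_cases hin : PySem.Str.isIn kv.1 s
      · rw [if_pos hin, PySem.Str.toList_replace, stepR]
        exact replace_eq_repAll _ _ _ hk
      · rw [if_neg hin, stepR]
        have : PySem.Chars.isIn kv.1.toList s.toList = false := by
          rw [← PySem.Str.isIn_eq]
          simpa using hin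
        exact (repAll_of_not_infix _ ((PySem.Chars.isIn_eq_false_iff _ _).mp this)).symm
    rw [← hstep] at *
    rw [← ih _ (fun p hp => h p (by simp [hp]))]

lemma A_toList (line : String) :
    (replace_known_defs line).toList = bPairs.foldl stepR line.toList := by
  rw [replace_known_defs, bridge knownDefs line (by decide)]
  have : knownDefs.map (fun kv => (kv.1.toList, kv.2.toList)) = bPairs := by decide
  rw [this]

-- ===== VERDICT (by name: the statement is the Claim_ definition above) =====
theorem replace_known_defs_spec : Claim_equal_replace_known_defs := by
  intro line _
  unfold Spec_replace_known_defs replace_known_defs_alt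
  have h1 : (replace_known_defs line).toList = scanB line.toList := by
    rw [A_toList, main_lists]
  rw [← h1, String.ofList_toList]
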